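-- pv_equiv track=rewrite | github.com/anis-rhm/TimeTable-Planning- | code/utilities.py | time_ordering_violated
-- ===== SOURCE A (Python) =====
-- SLOTS_PER_DAY = 4
--
-- def time_ordering_violated(chromosome, topic):
--     def slot_key(x): return x[0] * SLOTS_PER_DAY + x[1]
--
--     # Check if Theory, Practical, and Test exist for the topic
--     if (topic, "Theory") not in chromosome or (topic, "Practical") not in chromosome or (topic, "Test") not in chromosome:
--         return False  # No violation if any session type is missing
--
--     t_slots = sorted([(d, s) for (d, s, r, t) in chromosome[(topic, "Theory")]], key=slot_key)
--     p_slots = sorted([(d, s) for (d, s, r, t) in chromosome[(topic, "Practical")]], key=slot_key)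
--     x_slots = sorted([(d, s) for (d, s, r, t) in chromosome[(topic, "Test")]], key=slot_key)
--
--     if not t_slots or not p_slots or not x_slots:
--         return True
--
--     earliest_T = t_slots[0]
--     earliest_P = p_slots[0]
--     earliest_X = x_slots[0]
--
--     if slot_key(earliest_P) <= slot_key(earliest_T):
--         return True
--     if slot_key(earliest_X) <= slot_key(earliest_P):
--         return True
--     return False
-- ===== SOURCE B (Python) =====
-- SLOTS_PER_DAY = 4
--
-- def time_ordering_violated(chromosome, topic):
--     try:
--         session_lists = [chromosome[(topic, kind)] for kind in ("Theory", "Practical", "Test")]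
--     except KeyError:
--         return False  # No violation if any session type is missing
--     mins = []
--     for sessions in session_lists:
--         if not sessions:
--             return True
--         mins.append(min(d * SLOTS_PER_DAY + s for (d, s, r, t) in sessions))
--     t_min, p_min, x_min = mins
--     return p_min <= t_min or x_min <= p_min
-- ===== Notes on version B (the rewrite author's own statement) =====
-- stated objective: alternative
-- what changed: B replaces sorting each of the three session lists just to read the first element by a single-pass min of the integer slot keys per list, and one sequential try/except lookup pass instead of three membership tests followed by three indexed lookups.
import Mathlib
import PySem

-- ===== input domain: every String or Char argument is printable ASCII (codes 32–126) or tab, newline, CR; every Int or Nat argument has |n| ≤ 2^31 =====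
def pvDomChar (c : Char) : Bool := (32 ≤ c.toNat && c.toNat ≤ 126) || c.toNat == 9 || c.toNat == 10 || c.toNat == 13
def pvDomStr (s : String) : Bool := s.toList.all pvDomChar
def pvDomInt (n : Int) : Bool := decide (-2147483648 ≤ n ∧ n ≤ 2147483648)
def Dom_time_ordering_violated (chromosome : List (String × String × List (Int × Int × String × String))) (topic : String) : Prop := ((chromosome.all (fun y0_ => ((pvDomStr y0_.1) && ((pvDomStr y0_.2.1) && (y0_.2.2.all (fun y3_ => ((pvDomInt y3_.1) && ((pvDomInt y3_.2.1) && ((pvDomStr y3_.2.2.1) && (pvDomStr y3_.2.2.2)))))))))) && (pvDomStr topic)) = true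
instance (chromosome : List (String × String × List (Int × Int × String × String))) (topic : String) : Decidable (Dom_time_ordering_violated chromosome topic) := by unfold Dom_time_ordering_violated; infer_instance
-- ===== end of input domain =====

-- B takes a single-pass minimum of the integer slot keys of each session list instead of
-- sorting the list just to read its first element (objective: alternative algorithm).

-- dict lookup on the (topic, kind) keys (first match, none = key absent); shared by both ports
def pvLookup (chromosome : List (String × String × List (Int × Int × String × String))) (k1 k2 : String) : Option (List (Int × Int × String × String)) :=
  match chromosome with
  | [] => none
  | (a, b, v) :: rest => if a == k1 && b == k2 then some v else pvLookup rest k1 k2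

-- ===== PORT A =====
-- slot_key(x) = x[0] * SLOTS_PER_DAY + x[1]  with SLOTS_PER_DAY = 4
def slotKey (x : Int × Int) : Int := x.1 * 4 + x.2

def time_ordering_violated (chromosome : List (String × String × List (Int × Int × String × String))) (topic : String) : Bool :=
  match pvLookup chromosome topic "Theory", pvLookup chromosome topic "Practical", pvLookup chromosome topic "Test" with
  | some tl, some pl, some xl =>
    let t_slots := PySem.List.sorted (tl.map (fun y => (y.1, y.2.1))) slotKey
    let p_slots := PySem.List.sorted (pl.map (fun y => (y.1, y.2.1))) slotKey
    let x_slots := PySem.List.sorted (xl.map (fun y => (y.1, y.2.1))) slotKey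
    match t_slots, p_slots, x_slots with
    | earliest_T :: _, earliest_P :: _, earliest_X :: _ =>
      if slotKey earliest_P ≤ slotKey earliest_T then true
      else if slotKey earliest_X ≤ slotKey earliest_P then true
      else false
    | _, _, _ => true
  | _, _, _ => false

-- ===== PORT B =====
-- B looks the three kinds up sequentially (the Python comprehension stops at the first
-- KeyError) and takes a single-pass min of the slot keys of each list instead of sorting.
def time_ordering_violated_alt (chromosome : List (String × String × List (Int × Int × String × String))) (topic : String) : Bool :=
  match pvLookup chromosome topic "Theory" with
  | none => false
  | some tl =>
    match pvLookup chromosome topic "Practical" with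
    | none => false
    | some pl =>
      match pvLookup chromosome topic "Test" with
      | none => false
      | some xl =>
        match PySem.List.min? (tl.map (fun y => y.1 * 4 + y.2.1)) (fun v => v) with
        | none => true
        | some t_min =>
          match PySem.List.min? (pl.map (fun y => y.1 * 4 + y.2.1)) (fun v => v) with
          | none => true
          | some p_min =>
            match PySem.List.min? (xl.map (fun y => y.1 * 4 + y.2.1)) (fun v => v) with
            | none => true
            | some x_min => decide (p_min ≤ t_min) || decide (x_min ≤ p_min)

-- ===== PRECONDITION & SPEC =====
def Spec_time_ordering_violated (chromosome : List (String × String × List (Int × Int × String × String))) (topic : String) (out : Bool) : Prop := out = time_ordering_violated_alt chromosome topic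
instance (chromosome : List (String × String × List (Int × Int × String × String))) (topic : String) (out : Bool) : Decidable (Spec_time_ordering_violated chromosome topic out) := by unfold Spec_time_ordering_violated; infer_instance

-- ===== CLAIM (what is proved, stated in full; the proofs are below) =====
def Claim_equal_time_ordering_violated : Prop := ∀ (chromosome : List (String × String × List (Int × Int × String × String))) (topic : String), Dom_time_ordering_violated chromosome topic → Spec_time_ordering_violated chromosome topic (time_ordering_violated chromosome topic)

-- ===== LEMMAS AND PROOFS =====

-- the projected key list B minimises over is the slotKey image of A's pair list
lemma map_key_eq (l : List (Int × Int × String × String)) :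
    l.map (fun y => y.1 * 4 + y.2.1) = (l.map (fun y => (y.1, y.2.1))).map slotKey := by
  simp [List.map_map, slotKey, Function.comp]

-- B's min of the keys is the key of the head of A's sorted list
lemma min?_key_eq_head (l : List (Int × Int × String × String)) (m : Int × Int) (t : List (Int × Int))
    (h : PySem.List.sorted (l.map (fun y => (y.1, y.2.1))) slotKey = m :: t) :
    PySem.List.min? (l.map (fun y => y.1 * 4 + y.2.1)) (fun v => v) = some (slotKey m) := by
  rw [map_key_eq]
  set s := l.map (fun y => (y.1, y.2.1)) with hs
  have hsne : s ≠ [] := by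
    intro hnil
    rw [(PySem.List.sorted_eq_nil_iff s slotKey false).2 hnil] at h
    cases h
  have hmem : m ∈ s := by
    have : m ∈ PySem.List.sorted s slotKey := by rw [h]; exact List.mem_cons_self ..
    exact (PySem.List.mem_sorted s slotKey false m).1 this
  obtain ⟨v, hv⟩ : ∃ v, PySem.List.min? (s.map slotKey) (fun v => v) = some v := by
    cases hc : PySem.List.min? (s.map slotKey) (fun v => v) with
    | none =>
      exfalso
      have := (PySem.List.min?_eq_none_iff (s.map slotKey) (fun v => v)).1 hc
      exact hsne (by simpa using this)
    | some v => exact ⟨v, rfl⟩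
  have hvmem : v ∈ s.map slotKey := PySem.List.min?_mem hv
  obtain ⟨y, hy, hvy⟩ := List.mem_map.1 hvmem
  have h1 : slotKey m ≤ v := by
    have := PySem.List.key_head_sorted_le s slotKey h y hy
    omega
  have h2 : v ≤ slotKey m := by
    have := PySem.List.min?_isMin hv (slotKey m) (List.mem_map_of_mem hmem)
    simpa using this
  rw [hv]
  congr 1
  omega

-- empty list: A's sorted list is empty iff B's min? is none
lemma min?_eq_none_iff_sorted_nil (l : List (Int × Int × String × String)) :
    PySem.List.min? (l.map (fun y => y.1 * 4 + y.2.1)) (fun v => v) = none ↔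
    PySem.List.sorted (l.map (fun y => (y.1, y.2.1))) slotKey = [] := by
  rw [map_key_eq, PySem.List.min?_eq_none_iff, PySem.List.sorted_eq_nil_iff]
  simp

-- ===== VERDICT (by name: the statement is the Claim_ definition above) =====
theorem time_ordering_violated_spec : Claim_equal_time_ordering_violated := by
  intro chromosome topic _
  unfold Spec_time_ordering_violated time_ordering_violated time_ordering_violated_alt
  cases pvLookup chromosome topic "Theory" with
  | none => rfl
  | some tl =>
  cases pvLookup chromosome topic "Practical" with
  | none => rfl
  | some pl =>
  cases pvLookup chromosome topic "Test" with
  | none => rfl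
  | some xl =>
  simp only
  cases ht : PySem.List.sorted (tl.map (fun y => (y.1, y.2.1))) slotKey with
  | nil =>
    have := (min?_eq_none_iff_sorted_nil tl).2 ht
    simp [this]
  | cons eT tT =>
  cases hp : PySem.List.sorted (pl.map (fun y => (y.1, y.2.1))) slotKey with
  | nil =>
    have := (min?_eq_none_iff_sorted_nil pl).2 hp
    rw [min?_key_eq_head tl eT tT ht, this]
  | cons eP tP =>
  cases hx : PySem.List.sorted (xl.map (fun y => (y.1, y.2.1))) slotKey with
  | nil =>
    have := (min?_eq_none_iff_sorted_nil xl).2 hx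
    rw [min?_key_eq_head tl eT tT ht, min?_key_eq_head pl eP tP hp, this]
  | cons eX tX =>
    rw [min?_key_eq_head tl eT tT ht, min?_key_eq_head pl eP tP hp, min?_key_eq_head xl eX tX hx]
    by_cases h1 : slotKey eP ≤ slotKey eT <;> by_cases h2 : slotKey eX ≤ slotKey eP <;>
      simp [h1, h2]
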